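-- pv_equiv track=rewrite | github.com/RFCNLP/RFCNLP | nlp2promela/graphUtils.py | adjustedNumber
-- ===== SOURCE A (Python) =====
-- def adjustedNumber(number, missing):
--     # The integer number line is like:
--     # [][][][][][][][][][][][][][][][][][][][][][]
--     # but our number line is like
--     # [][][]<>[][][][]<><>[][][][]<>[][][][]<><><>
--     # where the <> are the missing numbers.
--     # So, given the index in the line Z - missing,
--     # what is the index in the original line Z?
--     cur_z     = 0
--     cur_z_mod = 0
--     while cur_z_mod < number:
--         cur_z += 1
--         if not cur_z in missing:
--             cur_z_mod += 1
--     return cur_z - 1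
-- ===== SOURCE B (Python) =====
-- def adjustedNumber(number, missing):
--     # Walk the distinct missing values in ascending order: every missing value
--     # that lands at or below the current candidate shifts the candidate up by one.
--     if number <= 0:
--         return -1
--     ans = number
--     for m in sorted(set(missing)):
--         if 1 <= m <= ans:
--             ans += 1
--     return ans - 1
-- ===== Notes on version B (the rewrite author's own statement) =====
-- stated objective: alternative
-- what changed: Replaces the unit-step walk along the number line (with a list-membership test per step) by a single ascending pass over sorted(set(missing)) that shifts the candidate index once per relevant missing value.
import Mathlib
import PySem

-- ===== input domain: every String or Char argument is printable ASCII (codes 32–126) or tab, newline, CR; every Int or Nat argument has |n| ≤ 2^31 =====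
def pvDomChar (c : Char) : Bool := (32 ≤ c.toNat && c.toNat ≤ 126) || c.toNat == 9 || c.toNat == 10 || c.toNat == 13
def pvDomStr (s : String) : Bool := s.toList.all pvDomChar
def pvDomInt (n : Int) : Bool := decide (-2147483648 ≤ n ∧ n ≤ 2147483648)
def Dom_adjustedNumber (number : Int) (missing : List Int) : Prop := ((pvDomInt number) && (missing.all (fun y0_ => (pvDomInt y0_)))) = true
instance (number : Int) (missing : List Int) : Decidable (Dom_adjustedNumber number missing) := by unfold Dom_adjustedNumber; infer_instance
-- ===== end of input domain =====

-- B changes the algorithm: one ascending pass over sorted(set(missing)) that shifts the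
-- candidate index, instead of a unit-step walk along the number line; objective: alternative.

-- ===== PORT A =====
-- A's while loop; state (cur_z, cur_z_mod); terminates because each step either
-- consumes one still-uncounted slot (cur_z_mod grows) or passes one missing value above cur_z.
def aLoop (number : Int) (missing : List Int) (z zm : Int) : Int :=
  if zm < number then
    if (z + 1) ∈ missing then aLoop number missing (z + 1) zm
    else aLoop number missing (z + 1) (zm + 1)
  else z - 1
termination_by (number - zm).toNat + missing.countP (fun m => decide (z < m))
decreasing_by
  · have hmem : (z + 1) ∈ missing := by assumption
    have hlt : missing.countP (fun m => decide (z + 1 < m)) <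
        missing.countP (fun m => decide (z < m)) := by
      induction missing with
      | nil => simp at hmem
      | cons a t ih =>
        rcases List.mem_cons.mp hmem with h | h
        · subst h
          have h1 : t.countP (fun m => decide (z + 1 < m)) ≤
              t.countP (fun m => decide (z < m)) := by
            apply List.countP_mono_left
            intro a _ h; simp at h ⊢; omega
          simp
          omega
        · have := ih h
          simp [List.countP_cons]
          split_ifs with h1 h2 <;> simp_all <;> omega
    omega
  · have h1 : missing.countP (fun m => decide (z + 1 < m)) ≤
        missing.countP (fun m => decide (z < m)) := by
      apply List.countP_mono_left
      intro a _ h; simp at h ⊢; omega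
    omega

def adjustedNumber (number : Int) (missing : List Int) : Int :=
  aLoop number missing 0 0

-- ===== PORT B =====
def bStep (ans m : Int) : Int := if 1 ≤ m ∧ m ≤ ans then ans + 1 else ans

def adjustedNumber_alt (number : Int) (missing : List Int) : Int :=
  if number ≤ 0 then -1
  else ((PySem.List.sorted (PySem.Set.ofList missing) (fun x => x) false).foldl bStep number) - 1

-- ===== PRECONDITION & SPEC =====
def Spec_adjustedNumber (number : Int) (missing : List Int) (out : Int) : Prop := out = adjustedNumber_alt number missing
instance (number : Int) (missing : List Int) (out : Int) : Decidable (Spec_adjustedNumber number missing out) := by unfold Spec_adjustedNumber; infer_instance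

-- ===== CLAIM (what is proved, stated in full; the proofs are below) =====
def Claim_equal_adjustedNumber : Prop := ∀ (number : Int) (missing : List Int), Dom_adjustedNumber number missing → Spec_adjustedNumber number missing (adjustedNumber number missing)

-- ===== LEMMAS AND PROOFS =====

-- bStep is a no-op on a list whose elements all exceed the accumulator.
lemma foldl_bStep_noop (ms : List Int) (c : Int) (h : ∀ m ∈ ms, c < m) :
    ms.foldl bStep c = c := by
  induction ms with
  | nil => rfl
  | cons a t ih =>
    have ha := h a (List.mem_cons_self ..)
    have : bStep c a = c := by unfold bStep; split_ifs with hh; omega; rfl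
    rw [List.foldl_cons, this, ih (fun m hm => h m (List.mem_cons_of_mem _ hm))]

-- nonpositive elements are no-ops of bStep
lemma foldl_bStep_filter_pos (ms : List Int) (ans : Int) :
    ms.foldl bStep ans = (ms.filter (fun m => decide (0 < m))).foldl bStep ans := by
  induction ms generalizing ans with
  | nil => rfl
  | cons a t ih =>
    by_cases ha : 0 < a
    · simp [ha, ih]
    · have : bStep ans a = ans := by unfold bStep; split_ifs with hh; omega; rfl
      simp [ha, this, ih]

-- In a strictly increasing list, splitting off z+1 from "the elements above z".
lemma filter_succ_split (ms : List Int) (hs : ms.Pairwise (· < ·)) (z : Int) :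
    ms.filter (fun m => decide (z < m)) =
      (if (z + 1) ∈ ms then (z + 1) :: ms.filter (fun m => decide (z + 1 < m))
       else ms.filter (fun m => decide (z + 1 < m))) := by
  induction ms with
  | nil => simp
  | cons a t ih =>
    have ha : ∀ b ∈ t, a < b := (List.pairwise_cons.mp hs).1
    have ht : t.Pairwise (· < ·) := (List.pairwise_cons.mp hs).2
    by_cases hz : z < a
    · have hft : t.filter (fun m => decide (z < m)) =
          t.filter (fun m => decide (z + 1 < m)) := by
        apply List.filter_congr
        intro b hb
        have := ha b hb; simp; omega
      by_cases hza : a = z + 1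
      · subst hza
        simp [hz, hft]
      · have hnmem : (z + 1) ∉ a :: t := by
          intro h
          rcases List.mem_cons.mp h with h | h
          · omega
          · exact absurd (ha _ h) (by omega)
        have hlt : z + 1 < a := by omega
        simp [hz, hnmem, hft, hlt]
    · have hnm : ¬ z + 1 < a := by omega
      have hane : ¬ (z + 1 = a) := by omega
      have h1 : ((z + 1) ∈ a :: t) = ((z + 1) ∈ t) := by
        simp [List.mem_cons, hane]
      by_cases hm : (z + 1) ∈ t
      · simp only [List.filter_cons, h1] at ih ⊢
        rw [ih ht, if_pos hm]
        simp [hz, hnm, hm]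
      · simp only [List.filter_cons, h1] at ih ⊢
        simp [hz, hnm, ih ht, hm]

-- Main invariant: A's loop from state (z, zm) equals B's fold over the still-relevant
-- part of the strictly sorted deduplicated missing list.
lemma aLoop_eq_fold (n : Int) (l ms : List Int) (hmem : ∀ x, x ∈ ms ↔ x ∈ l)
    (hs : ms.Pairwise (· < ·)) :
    ∀ z zm, 0 ≤ z → zm ≤ n →
      aLoop n l z zm = (ms.filter (fun m => decide (z < m))).foldl bStep (z + (n - zm)) - 1 := by
  intro z zm
  induction z, zm using aLoop.induct n l with
  | case1 z zm hlt hin ih =>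
    intro hz hzm
    have hms : (z + 1) ∈ ms := (hmem _).mpr hin
    rw [filter_succ_split ms hs z, if_pos hms]
    have hstep : bStep (z + (n - zm)) (z + 1) = z + 1 + (n - zm) := by
      unfold bStep; split_ifs with hh
      · omega
      · exfalso; omega
    rw [aLoop, if_pos hlt, if_pos hin, ih (by omega) hzm, List.foldl_cons, hstep]
  | case2 z zm hlt hin ih =>
    intro hz hzm
    have hms : (z + 1) ∉ ms := fun h => hin ((hmem _).mp h)
    rw [filter_succ_split ms hs z, if_neg hms]
    rw [aLoop, if_pos hlt, if_neg hin, ih (by omega) (by omega)]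
    congr 2
    omega
  | case3 z zm hlt =>
    intro hz hzm
    have hzm' : zm = n := by omega
    rw [aLoop, if_neg hlt]
    have : (ms.filter (fun m => decide (z < m))).foldl bStep (z + (n - zm)) = z := by
      subst hzm'
      simp only [sub_self, add_zero]
      apply foldl_bStep_noop
      intro m hm
      have := List.of_mem_filter hm
      simpa using this
    rw [this]

-- ===== VERDICT (by name: the statement is the Claim_ definition above) =====
theorem adjustedNumber_spec : Claim_equal_adjustedNumber := by
  intro number missing _
  unfold Spec_adjustedNumber adjustedNumber adjustedNumber_alt
  set ms := PySem.List.sorted (PySem.Set.ofList missing) (fun x => x) false with hms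
  have hsp : ms.Pairwise (· < ·) := PySem.List.sorted_ofList_pairwise_lt missing
  have hmem : ∀ x, x ∈ ms ↔ x ∈ missing := by
    intro x
    rw [hms, PySem.List.mem_sorted, PySem.Set.mem_ofList]
  by_cases hn : number ≤ 0
  · rw [if_pos hn, aLoop, if_neg (by omega)]
    norm_num
  · rw [if_neg hn]
    rw [aLoop_eq_fold number missing ms hmem hsp 0 0 (by omega) (by omega)]
    rw [foldl_bStep_filter_pos ms number]
    have h0 : (0 : Int) + (number - 0) = number := by omega
    rw [h0]
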